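-- pv_equiv track=rewrite | github.com/Allenyep/PymachineLearning | Utils/oneR.py | train_feature_value2
-- ===== SOURCE A (Python) =====
-- from collections import defaultdict
-- from operator import itemgetter
--
-- def train_feature_value2(X, y_true, feature_index, value):
--     class_counts = defaultdict(int)
--     for sample, y in zip(X, y_true):
--         if sample[feature_index] == value:
--             class_counts[y] += 1
--     sorted_class_counts = sorted(class_counts.items(), key=itemgetter(1), reverse=True)
--     most_frequent_class = sorted_class_counts[0][0]
--     incorrect_predictions = [class_count for class_value, class_count in class_counts.items() if
--                              class_value != most_frequent_class]
--     error = sum(incorrect_predictions)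
--     return most_frequent_class, error
-- ===== SOURCE B (Python) =====
-- def train_feature_value2(X, y_true, feature_index, value):
--     counts = {}
--     total = 0
--     for sample, y in zip(X, y_true):
--         if sample[feature_index] == value:
--             counts[y] = counts.get(y, 0) + 1
--             total += 1
--     items = list(counts.items())
--     best_k, best_c = items[0]
--     for k, c in items[1:]:
--         if c > best_c:
--             best_k, best_c = k, c
--     return best_k, total - best_c
-- ===== Notes on version B (the rewrite author's own statement) =====
-- stated objective: simpler
-- what changed: Replaces the sort-then-filter-then-sum phase by a single strict-> max scan over the insertion-ordered items plus error = total - best_count, with total tracked in the counting pass; no sort, no second filtering pass over the dict.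
import Mathlib
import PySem

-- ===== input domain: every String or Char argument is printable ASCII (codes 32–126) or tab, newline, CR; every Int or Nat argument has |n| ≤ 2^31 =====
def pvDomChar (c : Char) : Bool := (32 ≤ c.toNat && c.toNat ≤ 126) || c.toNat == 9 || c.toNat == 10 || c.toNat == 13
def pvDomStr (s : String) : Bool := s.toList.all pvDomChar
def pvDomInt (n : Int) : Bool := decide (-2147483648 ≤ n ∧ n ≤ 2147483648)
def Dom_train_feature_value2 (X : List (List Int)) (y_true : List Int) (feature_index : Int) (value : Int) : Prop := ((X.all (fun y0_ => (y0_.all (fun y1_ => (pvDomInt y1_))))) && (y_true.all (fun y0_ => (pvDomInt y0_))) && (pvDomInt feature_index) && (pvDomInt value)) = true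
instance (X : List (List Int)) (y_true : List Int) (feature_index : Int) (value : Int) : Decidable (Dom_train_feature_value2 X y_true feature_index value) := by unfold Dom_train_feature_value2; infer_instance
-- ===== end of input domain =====

-- B drops A's sort-filter-sum phase: it tracks the total in the counting pass, takes the
-- first strict-> maximum of the items in insertion order, and returns error = total - best count.

-- ===== PORT A =====
def train_feature_value2 (X : List (List Int)) (y_true : List Int) (feature_index : Int) (value : Int) : Int × Int :=
  let class_counts : PySem.Dict Int Int :=
    (X.zip y_true).foldl
      (fun d p => if PySem.List.pyGet? p.1 feature_index == some value then d.modify p.2 0 (· + 1) else d)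
      PySem.Dict.empty
  let sorted_class_counts := PySem.List.sorted class_counts.items (fun p => p.2) true
  -- sorted_class_counts[0] raises IndexError when empty: excluded by Pre_, pyGetD is exact inside Pre_
  let most_frequent_class := (PySem.List.pyGetD sorted_class_counts 0 ((0 : Int), (0 : Int))).1
  let incorrect_predictions := (class_counts.items.filter (fun p => !(p.1 == most_frequent_class))).map Prod.snd
  let error := incorrect_predictions.sum
  (most_frequent_class, error)

-- ===== PORT B =====
def train_feature_value2_alt (X : List (List Int)) (y_true : List Int) (feature_index : Int) (value : Int) : Int × Int :=
  let st :=
    (X.zip y_true).foldl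
      (fun st p => if PySem.List.pyGet? p.1 feature_index == some value
                   then (st.1.modify p.2 0 (· + 1), st.2 + 1) else st)
      ((PySem.Dict.empty : PySem.Dict Int Int), (0 : Int))
  let items := st.1.items
  -- items[0] raises IndexError when empty: excluded by Pre_, pyGetD is exact inside Pre_
  let b0 := PySem.List.pyGetD items 0 ((0 : Int), (0 : Int))
  let best := (items.drop 1).foldl (fun b p => if p.2 > b.2 then p else b) b0
  (best.1, st.2 - best.2)

-- ===== PRECONDITION & SPEC =====
-- Pre_ excludes exactly the inputs where Python A raises IndexError: a zipped sample whose
-- feature_index is out of range, or no matching sample at all (empty class_counts indexed at [0]).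
def Pre_train_feature_value2 (X : List (List Int)) (y_true : List Int) (feature_index : Int) (value : Int) : Prop :=
  (∀ p ∈ X.zip y_true, PySem.Raise.InRange p.1.length feature_index) ∧
  (∃ p ∈ X.zip y_true, PySem.List.pyGet? p.1 feature_index = some value)
instance (X : List (List Int)) (y_true : List Int) (feature_index : Int) (value : Int) : Decidable (Pre_train_feature_value2 X y_true feature_index value) := by unfold Pre_train_feature_value2; infer_instance

def pvWitness_train_feature_value2 : List (List Int) × List Int × Int × Int := ([[1], [2]], [5, 5], 0, 1)

def Spec_train_feature_value2 (X : List (List Int)) (y_true : List Int) (feature_index : Int) (value : Int) (out : Int × Int) : Prop := out = train_feature_value2_alt X y_true feature_index value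
instance (X : List (List Int)) (y_true : List Int) (feature_index : Int) (value : Int) (out : Int × Int) : Decidable (Spec_train_feature_value2 X y_true feature_index value out) := by unfold Spec_train_feature_value2; infer_instance

-- ===== CLAIM (what is proved, stated in full; the proofs are below) =====
def Claim_equal_train_feature_value2 : Prop := ∀ (X : List (List Int)) (y_true : List Int) (feature_index : Int) (value : Int), Dom_train_feature_value2 X y_true feature_index value → Pre_train_feature_value2 X y_true feature_index value → Spec_train_feature_value2 X y_true feature_index value (train_feature_value2 X y_true feature_index value)

-- ===== LEMMAS AND PROOFS =====

-- insertBy unfolds on a cons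
theorem pv_insertBy_cons (bf : (Int × Int) → (Int × Int) → Bool) (x b : Int × Int) (t : List (Int × Int)) :
    PySem.List.insertBy bf x (b :: t) = if bf x b then x :: b :: t else b :: PySem.List.insertBy bf x t := by
  simp [PySem.List.insertBy]

-- head of the reverse insertion sort = the strict-> running-max scan (stability)
theorem pv_foldl_insertBy_head (l : List (Int × Int)) : ∀ (t : List (Int × Int)) (b : Int × Int),
    (l.foldl (fun acc x => PySem.List.insertBy (fun a c => decide (c.2 < a.2)) x acc) (b :: t)).head?
      = some (l.foldl (fun b x => if x.2 > b.2 then x else b) b) := by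
  induction l with
  | nil => intro t b; simp
  | cons x l ih =>
    intro t b
    simp only [List.foldl_cons, pv_insertBy_cons]
    by_cases h : x.2 > b.2
    · have hb : b.2 < x.2 := h
      simp [hb, ih]
    · have hb : ¬ b.2 < x.2 := h
      simp [hb, ih]

-- the scan result is the start or a member of the list
theorem pv_foldl_scan_mem (l : List (Int × Int)) : ∀ (b : Int × Int),
    l.foldl (fun b x => if x.2 > b.2 then x else b) b = b ∨
    l.foldl (fun b x => if x.2 > b.2 then x else b) b ∈ l := by
  induction l with
  | nil => intro b; left; rfl
  | cons x l ih =>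
    intro b
    simp only [List.foldl_cons]
    rcases ih (if x.2 > b.2 then x else b) with h | h
    · rw [h]; by_cases hx : x.2 > b.2
      · right; simp [hx]
      · left; simp [hx]
    · right; exact List.mem_cons_of_mem _ h

-- summing the counts of all keys ≠ k equals total minus k's count, when keys are unique
theorem pv_filter_sum_ne (k c : Int) : ∀ (l : List (Int × Int)),
    (l.map Prod.fst).Nodup → (k, c) ∈ l →
    ((l.filter (fun p => !(p.1 == k))).map Prod.snd).sum = (l.map Prod.snd).sum - c := by
  intro l
  induction l with
  | nil => intro _ h; cases h
  | cons a t ih =>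
    intro hnd hmem
    simp only [List.map_cons, List.nodup_cons] at hnd
    rcases List.mem_cons.mp hmem with heq | hmem'
    · subst heq
      have ht : t.filter (fun p => !(p.1 == k)) = t := by
        apply List.filter_eq_self.mpr
        intro p hp
        have hpk : p.1 ≠ k := by
          intro h
          apply hnd.1
          rw [← h]
          exact List.mem_map_of_mem (f := Prod.fst) (a := p) hp
        simp [hpk]
      simp [ht]
    · have hk : k ∈ t.map Prod.fst := List.mem_map_of_mem (f := Prod.fst) hmem'
      have ha : a.1 ≠ k := by intro h; exact hnd.1 (h ▸ hk)
      have hrec := ih hnd.2 hmem'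
      have hfa : (a.1 == k) = false := by simp [ha]
      simp only [List.filter_cons, hfa, Bool.not_false, if_true, List.map_cons, List.sum_cons, hrec]
      ring

-- replacing the unique entry at key k by (k, v) changes the value sum by v - c
theorem pv_sum_map_replace (k c v : Int) : ∀ (l : List (Int × Int)),
    (l.map Prod.fst).Nodup → (k, c) ∈ l →
    ((l.map (fun p => if p.1 == k then (k, v) else p)).map Prod.snd).sum
      = (l.map Prod.snd).sum - c + v := by
  intro l
  induction l with
  | nil => intro _ h; cases h
  | cons a t ih =>
    intro hnd hmem
    simp only [List.map_cons, List.nodup_cons] at hnd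
    rcases List.mem_cons.mp hmem with heq | hmem'
    · subst heq
      have ht : t.map (fun p => if p.1 == k then ((k : Int), v) else p) = t := by
        have : ∀ p ∈ t, (if p.1 == k then ((k : Int), v) else p) = id p := by
          intro p hp
          have hpk : p.1 ≠ k := by
            intro h
            apply hnd.1
            rw [← h]
            exact List.mem_map_of_mem (f := Prod.fst) (a := p) hp
          simp [hpk]
        rw [List.map_congr_left this, List.map_id]
      simp only [List.map_cons, ht]
      simp
      ring
    · have hk : k ∈ t.map Prod.fst := List.mem_map_of_mem (f := Prod.fst) hmem'
      have ha : a.1 ≠ k := by intro h; exact hnd.1 (h ▸ hk)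
      have hrec := ih hnd.2 hmem'
      have hfa : (a.1 == k) = false := by simp [ha]
      simp only [List.map_cons, hfa, Bool.false_eq_true, if_false, List.sum_cons, hrec]
      ring

-- contains means some (k, c) is in the items
theorem pv_contains_mem (d : PySem.Dict Int Int) (k : Int) (hc : d.contains k = true) :
    ∃ c, (k, c) ∈ d.items := by
  have hk : k ∈ d.keys := (PySem.Dict.contains_iff_mem_keys d k).mp hc
  have hk' : k ∈ d.items.map Prod.fst := hk
  rcases List.mem_map.mp hk' with ⟨p, hp, hfst⟩
  refine ⟨p.2, ?_⟩
  have : ((k : Int), p.2) = p := by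
    rw [← hfst]
  rw [this]
  exact hp

-- modify never empties a dict
theorem pv_modify_ne_nil (d : PySem.Dict Int Int) (k : Int) :
    (d.modify k 0 (· + 1)).items ≠ [] := by
  unfold PySem.Dict.modify
  by_cases hc : d.contains k = true
  · rw [PySem.Dict.items_insert_of_contains d _ hc]
    rcases pv_contains_mem d k hc with ⟨c, hm⟩
    intro h
    rw [List.map_eq_nil_iff] at h
    rw [h] at hm
    cases hm
  · rw [PySem.Dict.items_insert_of_not_contains d _ (by simpa using hc)]
    simp

-- one counting step: keys stay unique, the value sum grows by one
theorem pv_modify_facts (d : PySem.Dict Int Int) (k : Int)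
    (hnd : (d.items.map Prod.fst).Nodup) :
    ((d.modify k 0 (· + 1)).items.map Prod.fst).Nodup ∧
    ((d.modify k 0 (· + 1)).items.map Prod.snd).sum = (d.items.map Prod.snd).sum + 1 := by
  have hkeys : d.keys = d.items.map Prod.fst := rfl
  unfold PySem.Dict.modify
  by_cases hc : d.contains k = true
  · rcases pv_contains_mem d k hc with ⟨c, hm⟩
    have hget : d.getD k 0 = c := PySem.Dict.getD_of_mem_items d hm (by rw [hkeys]; exact hnd) 0
    rw [PySem.Dict.items_insert_of_contains d _ hc]
    constructor
    · have heq : (d.items.map (fun p => if p.1 == k then (k, d.getD k 0 + 1) else p)).map Prod.fst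
          = d.items.map Prod.fst := by
        rw [List.map_map]
        apply List.map_congr_left
        intro p _
        by_cases h : p.1 = k <;> simp [h]
      rw [heq]; exact hnd
    · rw [pv_sum_map_replace k c _ d.items hnd hm, hget]; ring
  · have hc' : d.contains k = false := by simpa using hc
    have hget : d.getD k 0 = 0 := PySem.Dict.getD_of_not_contains d 0 hc'
    rw [PySem.Dict.items_insert_of_not_contains d _ hc']
    constructor
    · rw [List.map_append]
      simp only [List.map_cons, List.map_nil]
      rw [List.nodup_append]
      refine ⟨hnd, List.nodup_singleton _, ?_⟩
      intro a ha
      simp only [List.mem_singleton]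
      rintro b hbk heq
      rw [hbk] at heq
      rw [heq] at ha
      have hct : d.contains k = true := (PySem.Dict.contains_iff_mem_keys d k).mpr (by rw [hkeys]; exact ha)
      rw [hc'] at hct
      simp at hct
    · rw [List.map_append, List.sum_append]
      simp [hget]

-- the paired fold of B: same dict as A's fold, unique keys, and total = value sum
theorem pv_fold_inv (cond : List Int × Int → Bool) (L : List (List Int × Int)) :
    ∀ (d : PySem.Dict Int Int) (t : Int),
    (d.items.map Prod.fst).Nodup → t = (d.items.map Prod.snd).sum →
    (L.foldl (fun st p => if cond p then (st.1.modify p.2 0 (· + 1), st.2 + 1) else st) (d, t)).1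
      = L.foldl (fun d p => if cond p then d.modify p.2 0 (· + 1) else d) d ∧
    ((L.foldl (fun d p => if cond p then d.modify p.2 0 (· + 1) else d) d).items.map Prod.fst).Nodup ∧
    (L.foldl (fun st p => if cond p then (st.1.modify p.2 0 (· + 1), st.2 + 1) else st) (d, t)).2
      = ((L.foldl (fun d p => if cond p then d.modify p.2 0 (· + 1) else d) d).items.map Prod.snd).sum := by
  induction L with
  | nil => intro d t hnd ht; exact ⟨rfl, hnd, ht⟩
  | cons p L ih =>
    intro d t hnd ht
    simp only [List.foldl_cons]
    by_cases hc : cond p = true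
    · simp only [hc, if_true]
      rcases pv_modify_facts d p.2 hnd with ⟨hnd', hsum'⟩
      exact ih (d.modify p.2 0 (· + 1)) (t + 1) hnd' (by rw [hsum', ht])
    · simp only [hc]
      exact ih d t hnd ht

-- if some pair matches, A's dict ends up nonempty
theorem pv_fold_ne_nil (cond : List Int × Int → Bool) (L : List (List Int × Int)) :
    ∀ (d : PySem.Dict Int Int),
    ((∃ p ∈ L, cond p = true) ∨ d.items ≠ []) →
    (L.foldl (fun d p => if cond p then d.modify p.2 0 (· + 1) else d) d).items ≠ [] := by
  induction L with
  | nil =>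
    intro d h
    rcases h with ⟨p, hp, _⟩ | h
    · cases hp
    · exact h
  | cons p L ih =>
    intro d h
    simp only [List.foldl_cons]
    by_cases hc : cond p = true
    · simp only [hc, if_true]
      exact ih _ (Or.inr (pv_modify_ne_nil d p.2))
    · simp only [hc]
      apply ih d
      rcases h with ⟨q, hq, hcq⟩ | h
      · rcases List.mem_cons.mp hq with rfl | hq'
        · exact absurd hcq hc
        · exact Or.inl ⟨q, hq', hcq⟩
      · exact Or.inr h

-- the post-processing phases agree on any nonempty items list with unique keys
theorem pv_main (l : List (Int × Int))
    (hnd : (l.map Prod.fst).Nodup) (hne : l ≠ []) :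
    ((PySem.List.pyGetD (PySem.List.sorted l (fun p => p.2) true) 0 ((0 : Int), (0 : Int))).1,
      ((l.filter (fun p => !(p.1 == (PySem.List.pyGetD (PySem.List.sorted l (fun p => p.2) true) 0 ((0 : Int), (0 : Int))).1))).map Prod.snd).sum)
    = (((l.drop 1).foldl (fun b p => if p.2 > b.2 then p else b) (PySem.List.pyGetD l 0 ((0 : Int), (0 : Int)))).1,
       (l.map Prod.snd).sum - ((l.drop 1).foldl (fun b p => if p.2 > b.2 then p else b) (PySem.List.pyGetD l 0 ((0 : Int), (0 : Int)))).2) := by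
  rcases hl : l with _ | ⟨i0, rest⟩
  · exact absurd hl hne
  subst hl
  have hb0 : PySem.List.pyGetD (i0 :: rest) 0 ((0 : Int), (0 : Int)) = i0 :=
    PySem.List.pyGetD_zero_cons i0 rest _
  have hdrop : (i0 :: rest).drop 1 = rest := rfl
  rw [hb0, hdrop]
  set best := rest.foldl (fun b p => if p.2 > b.2 then p else b) i0 with hbest
  have hsorted : (PySem.List.sorted (i0 :: rest) (fun p => p.2) true).head? = some best := by
    rw [PySem.List.sorted_rev_eq_foldl_insertBy]
    have hbeta : (fun (a b : Int × Int) => decide ((fun p : Int × Int => p.2) b < (fun p : Int × Int => p.2) a))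
        = (fun (a c : Int × Int) => decide (c.2 < a.2)) := rfl
    rw [hbeta]
    simp only [List.foldl_cons]
    have h0 : PySem.List.insertBy (fun (a c : Int × Int) => decide (c.2 < a.2)) i0 ([] : List (Int × Int)) = [i0] := rfl
    rw [h0]
    exact pv_foldl_insertBy_head rest [] i0
  have hget : PySem.List.pyGetD (PySem.List.sorted (i0 :: rest) (fun p => p.2) true) 0 ((0 : Int), (0 : Int)) = best := by
    rcases hs : PySem.List.sorted (i0 :: rest) (fun p => p.2) true with _ | ⟨a, t⟩
    · rw [hs] at hsorted; cases hsorted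
    · rw [hs] at hsorted
      simp only [List.head?_cons, Option.some.injEq] at hsorted
      rw [PySem.List.pyGetD_zero_cons a t _, hsorted]
  have hmem : best ∈ i0 :: rest := by
    rcases pv_foldl_scan_mem rest i0 with h | h
    · rw [hbest, h]; exact List.mem_cons_self
    · exact List.mem_cons_of_mem _ h
  rw [hget]
  refine Prod.ext rfl ?_
  have hmem' : (best.1, best.2) ∈ i0 :: rest := by
    have : (best.1, best.2) = best := rfl
    rw [this]; exact hmem
  exact pv_filter_sum_ne best.1 best.2 (i0 :: rest) hnd hmem'

-- ===== VERDICT (by name: the statement is the Claim_ definition above) =====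
theorem train_feature_value2_spec : Claim_equal_train_feature_value2 := by
  intro X y_true feature_index value _ hpre
  unfold Spec_train_feature_value2
  have hinv := pv_fold_inv (fun p => PySem.List.pyGet? p.1 feature_index == some value) (X.zip y_true)
      PySem.Dict.empty 0 (by simp [PySem.Dict.empty]) (by simp [PySem.Dict.empty])
  rcases hinv with ⟨hfst, hnd, hsnd⟩
  have hne := pv_fold_ne_nil (fun p => PySem.List.pyGet? p.1 feature_index == some value) (X.zip y_true)
      PySem.Dict.empty
      (Or.inl (by rcases hpre.2 with ⟨p, hp, hpv⟩; exact ⟨p, hp, by simp [hpv]⟩))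
  simp only [train_feature_value2, train_feature_value2_alt]
  rw [hfst, hsnd]
  exact pv_main _ hnd hne
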